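-- pv_equiv track=rewrite | github.com/huhusmang/CodeTransEval | src/function/extract/extract_code_cpp.py | extract_called_functions
-- ===== SOURCE A (Python) =====
-- from typing import List, Dict, Set
--
-- def extract_single_function(lines: List[str], start_line: int) -> str:
--     function_lines = []
--     brace_count = 0
--     for line in lines[start_line:]:
--         brace_count += line.count("{")
--         brace_count -= line.count("}")
--         function_lines.append(line)
--         if brace_count == 0:
--             break
--     return "\n".join(function_lines)
--
-- def extract_called_functions(
--     function_names: Dict[str, int],
--     function: str,
--     lines: List[str],
--     visited: Set[str] = None,
-- ) -> List[str]:
--     if visited is None: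
--         visited = set()
--     if function in visited:
--         return []
--     visited.add(function)
--     extracted_functions = [extract_single_function(lines, function_names[function])]
--     for name in function_names:
--         if name in extracted_functions[0]:
--             extracted_functions.extend(
--                 extract_called_functions(function_names, name, lines, visited)
--             )
--     return extracted_functions
-- ===== SOURCE B (Python) =====
-- from typing import List, Dict, Set
--
-- def extract_single_function(lines: List[str], start_line: int) -> str:
--     function_lines = []
--     brace_count = 0
--     for line in lines[start_line:]:
--         brace_count += line.count("{")
--         brace_count -= line.count("}")
--         function_lines.append(line)
--         if brace_count == 0:
--             break
--     return "\n".join(function_lines)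
--
-- def extract_called_functions(
--     function_names: Dict[str, int],
--     function: str,
--     lines: List[str],
--     visited: Set[str] = None,
-- ) -> List[str]:
--     # Iterative DFS with an explicit stack instead of recursion.
--     if visited is None:
--         visited = set()
--     out = []
--     stack = [function]
--     while stack:
--         node = stack.pop()
--         if node in visited:
--             continue
--         visited.add(node)
--         body = extract_single_function(lines, function_names[node])
--         out.append(body)
--         children = [name for name in function_names if name in body]
--         for child in reversed(children):
--             stack.append(child)
--     return out
-- ===== Notes on version B (the rewrite author's own statement) =====
-- stated objective: alternative
-- what changed: The recursive DFS over transitively called functions is replaced by an iterative DFS with an explicit list-as-stack (mark visited at pop, push the matching names in reversed order), producing the identical preorder output without recursion.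
import Mathlib
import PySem

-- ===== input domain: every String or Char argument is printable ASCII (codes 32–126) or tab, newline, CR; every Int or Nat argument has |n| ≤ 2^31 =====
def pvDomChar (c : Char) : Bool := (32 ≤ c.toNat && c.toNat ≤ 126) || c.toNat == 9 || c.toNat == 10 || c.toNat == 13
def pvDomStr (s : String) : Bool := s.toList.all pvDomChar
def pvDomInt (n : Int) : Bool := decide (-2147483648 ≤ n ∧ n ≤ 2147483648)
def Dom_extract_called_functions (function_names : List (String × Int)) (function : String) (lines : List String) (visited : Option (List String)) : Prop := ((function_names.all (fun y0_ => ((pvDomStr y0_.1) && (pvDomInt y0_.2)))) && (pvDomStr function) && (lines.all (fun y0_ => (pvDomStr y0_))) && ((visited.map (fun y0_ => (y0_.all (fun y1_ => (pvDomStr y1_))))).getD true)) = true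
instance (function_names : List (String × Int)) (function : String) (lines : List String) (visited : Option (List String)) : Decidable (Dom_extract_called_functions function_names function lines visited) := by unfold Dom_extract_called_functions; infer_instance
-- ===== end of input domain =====

-- A recursive DFS (port A) versus an explicit-stack iterative DFS (port B); equivalence is about
-- the RETURN value only (the Python versions both mutate the caller's `visited` set, identically).

-- ===== PORT A =====
-- shared helper: extract_single_function(lines, start_line) (used verbatim by both Pythons)
def pvEsfLoop (rem : List String) (brace_count : Int) (function_lines : List String) : List String :=
  match rem with
  | [] => function_lines
  | line :: rest =>
    let brace_count := brace_count + (PySem.Str.count line "{" : Int) - (PySem.Str.count line "}" : Int)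
    let function_lines := function_lines ++ [line]
    if brace_count == 0 then function_lines else pvEsfLoop rest brace_count function_lines

def extract_single_function (lines : List String) (start_line : Int) : String :=
  PySem.Str.join "\n" (pvEsfLoop (PySem.List.slice lines (some start_line) none) 0 [])

-- A's recursion, with the shared mutable `visited` threaded through; `fuel` is a totality guard
-- only (never exhausted: each nested call adds a new dict key to `visited`).
mutual
def pvAgo (fuel : Nat) (fns : PySem.Dict String Int) (lines : List String) (function : String)
    (visited : List String) : List String × List String :=
  match fuel with
  | 0 => ([], visited)
  | fuel + 1 =>
    if PySem.Set.contains visited function then ([], visited)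
    else
      let visited := PySem.Set.add visited function
      match PySem.Dict.get? fns function with
      | none => ([], visited)  -- Python raises KeyError here (excluded by Pre_)
      | some idx =>
        let body := extract_single_function lines idx
        pvAfor fuel fns lines body fns.keys [body] visited
termination_by (fuel, 1, 0)

-- the 'for name in function_names: if name in extracted_functions[0]: extend(recurse)' loop
def pvAfor (fuel : Nat) (fns : PySem.Dict String Int) (lines : List String) (body : String)
    (rem : List String) (acc : List String) (visited : List String) : List String × List String :=
  match rem with
  | [] => (acc, visited)
  | name :: rest =>
    if PySem.Str.isIn name body then
      let r := pvAgo fuel fns lines name visited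
      pvAfor fuel fns lines body rest (acc ++ r.1) r.2
    else pvAfor fuel fns lines body rest acc visited
termination_by (fuel + 1, 0, rem.length)
end

def extract_called_functions (function_names : List (String × Int)) (function : String) (lines : List String) (visited : Option (List String)) : List String :=
  let fns := PySem.Dict.ofList function_names
  let visited := match visited with | none => PySem.Set.empty | some v => v
  (pvAgo (fns.keys.length + 1) fns lines function visited).1

-- ===== PORT B =====
-- the 'while stack:' loop; `fuel` is a totality guard only (never exhausted: pops are bounded
-- by 1 + visits × keys)
def pvBloop (fuel : Nat) (fns : PySem.Dict String Int) (lines : List String)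
    (stack : List String) (visited : List String) (out : List String) : List String :=
  match fuel with
  | 0 => out
  | fuel + 1 =>
    match stack with
    | [] => out
    | node :: rest =>
      if PySem.Set.contains visited node then pvBloop fuel fns lines rest visited out
      else
        let visited := PySem.Set.add visited node
        match PySem.Dict.get? fns node with
        | none => out  -- Python raises KeyError here (excluded by Pre_)
        | some idx =>
          let body := extract_single_function lines idx
          let children := fns.keys.filter (fun name => PySem.Str.isIn name body)
          pvBloop fuel fns lines (children ++ rest) visited (out ++ [body])

def extract_called_functions_alt (function_names : List (String × Int)) (function : String) (lines : List String) (visited : Option (List String)) : List String :=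
  let fns := PySem.Dict.ofList function_names
  let visited := match visited with | none => PySem.Set.empty | some v => v
  pvBloop (fns.keys.length * (fns.keys.length + 1) + 1) fns lines [function] visited []

-- ===== PRECONDITION & SPEC =====
-- Pre_ excludes exactly the inputs where Python raises KeyError: `function` neither a key of
-- `function_names` nor already in `visited` (every deeper lookup uses a dict key, so only the
-- top-level name can miss).
def Pre_extract_called_functions (function_names : List (String × Int)) (function : String) (lines : List String) (visited : Option (List String)) : Prop :=
  function ∈ function_names.map Prod.fst ∨ function ∈ visited.getD []
instance (function_names : List (String × Int)) (function : String) (lines : List String) (visited : Option (List String)) : Decidable (Pre_extract_called_functions function_names function lines visited) := by unfold Pre_extract_called_functions; infer_instance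

def pvWitness_extract_called_functions : (List (String × Int)) × String × List String × Option (List String) :=
  ([("main", 0), ("f", 2)], "main", ["int main() { f(); }", "", "void f() {", "}"], none)

def Spec_extract_called_functions (function_names : List (String × Int)) (function : String) (lines : List String) (visited : Option (List String)) (out : List String) : Prop := out = extract_called_functions_alt function_names function lines visited
instance (function_names : List (String × Int)) (function : String) (lines : List String) (visited : Option (List String)) (out : List String) : Decidable (Spec_extract_called_functions function_names function lines visited out) := by unfold Spec_extract_called_functions; infer_instance

-- ===== CLAIM (what is proved, stated in full; the proofs are below) =====
def Claim_equal_extract_called_functions : Prop := ∀ (function_names : List (String × Int)) (function : String) (lines : List String) (visited : Option (List String)), Dom_extract_called_functions function_names function lines visited → Pre_extract_called_functions function_names function lines visited → Spec_extract_called_functions function_names function lines visited (extract_called_functions function_names function lines visited)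

-- ===== LEMMAS AND PROOFS =====

-- number of dict keys not yet visited: the decreasing quantity of the DFS
def pvCnt (fns : PySem.Dict String Int) (vis : List String) : Nat :=
  fns.keys.countP (fun k => !(PySem.Set.contains vis k))

-- A's recursion applied to a LIST of nodes in sequence (what B's stack denotes)
def pvAnodes (fuel : Nat) (fns : PySem.Dict String Int) (lines : List String) :
    List String → List String → List String × List String
  | [], vis => ([], vis)
  | n :: ns, vis =>
    let r := pvAgo fuel fns lines n vis
    let r2 := pvAnodes fuel fns lines ns r.2
    (r.1 ++ r2.1, r2.2)

lemma pvAfor_prefix_of (fuel : Nat) (fns : PySem.Dict String Int) (lines : List String)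
    (hP : ∀ n vis, vis <+: (pvAgo fuel fns lines n vis).2) :
    ∀ rem body acc vis, vis <+: (pvAfor fuel fns lines body rem acc vis).2 := by
  intro rem
  induction rem with
  | nil => intro body acc vis; simp [pvAfor]
  | cons name rest ih =>
    intro body acc vis
    rw [pvAfor]
    by_cases h : PySem.Str.isIn name body
    · simp only [h, if_pos]
      exact (hP name vis).trans (ih body _ _)
    · simp only [h, if_neg, Bool.false_eq_true, not_false_eq_true]
      exact ih body acc vis

lemma pvAgo_prefix (fuel : Nat) (fns : PySem.Dict String Int) (lines : List String) :
    ∀ n vis, vis <+: (pvAgo fuel fns lines n vis).2 := by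
  induction fuel with
  | zero => intro n vis; simp [pvAgo]
  | succ fuel ih =>
    intro n vis
    rw [pvAgo]
    by_cases h : PySem.Set.contains vis n
    · have : n ∈ vis := by simpa using h
      simp [this]
    · simp only [h, Bool.false_eq_true, if_neg, not_false_eq_true]
      have hadd : vis <+: PySem.Set.add vis n := by
        simp only [Bool.not_eq_true] at h
        simp at h
        simp [PySem.Set.add, h]
      cases hg : PySem.Dict.get? fns n with
      | none => simpa using hadd
      | some idx =>
        simp only []
        exact hadd.trans (pvAfor_prefix_of fuel fns lines ih _ _ _ _)

lemma pvCnt_mono (fns : PySem.Dict String Int) {v w : List String} (h : v <+: w) :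
    pvCnt fns w ≤ pvCnt fns v := by
  apply List.countP_mono_left
  intro k _ hk
  have hkw : k ∉ w := by simpa using hk
  have : k ∉ v := fun hv => hkw (h.subset hv)
  simpa using this

lemma pvCountP_add_lt (l : List String) {vis : List String} {n : String}
    (hk : n ∈ l) (hnv : n ∉ vis) :
    l.countP (fun k => !PySem.Set.contains (vis ++ [n]) k) <
      l.countP (fun k => !PySem.Set.contains vis k) := by
  have hmono : ∀ t : List String, t.countP (fun k => !PySem.Set.contains (vis ++ [n]) k) ≤
      t.countP (fun k => !PySem.Set.contains vis k) := by
    intro t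
    apply List.countP_mono_left
    intro k _ hk2
    have : k ∉ vis ++ [n] := by simpa using hk2
    have : k ∉ vis := fun hv => this (List.mem_append_left _ hv)
    simpa using this
  induction l with
  | nil => simp at hk
  | cons a t iht =>
    rw [List.countP_cons, List.countP_cons]
    rcases List.mem_cons.mp hk with rfl | hat
    · have := hmono t
      simp at this
      simp [hnv]
      omega
    · have hlt := iht hat
      simp at hlt
      by_cases hc : a ∈ vis
      · have hc2 : a ∈ vis ++ [n] := List.mem_append_left _ hc
        simp [hc, hc2]
        omega
      · by_cases hd : a = n
        · subst hd
          simp [hnv]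
          omega
        · have hc2 : a ∉ vis ++ [n] := by simp [hc, hd]
          simp [hc, hc2]
          omega

lemma pvCnt_add_lt (fns : PySem.Dict String Int) {vis : List String} {n : String}
    (hk : n ∈ fns.keys) (hv : PySem.Set.contains vis n = false) :
    pvCnt fns (PySem.Set.add vis n) < pvCnt fns vis := by
  have hnv : n ∉ vis := by simpa using hv
  have hadd : PySem.Set.add vis n = vis ++ [n] := by simp [PySem.Set.add, hnv]
  rw [pvCnt, pvCnt, hadd]
  exact pvCountP_add_lt fns.keys hk hnv

-- fuel irrelevance: any sufficient fuel computes the same result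
lemma pvAgo_fuel (fns : PySem.Dict String Int) (lines : List String) : ∀ c : Nat,
    (∀ vis, pvCnt fns vis ≤ c → ∀ f1 f2, pvCnt fns vis < f1 → pvCnt fns vis < f2 →
      ∀ n, pvAgo f1 fns lines n vis = pvAgo f2 fns lines n vis) ∧
    (∀ vis, pvCnt fns vis ≤ c → ∀ f1 f2, pvCnt fns vis < f1 → pvCnt fns vis < f2 →
      ∀ rem body acc, pvAfor f1 fns lines body rem acc vis = pvAfor f2 fns lines body rem acc vis) := by
  intro c
  induction c using Nat.strong_induction_on with
  | _ c ih =>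
    have hG : ∀ vis, pvCnt fns vis ≤ c → ∀ f1 f2, pvCnt fns vis < f1 → pvCnt fns vis < f2 →
        ∀ n, pvAgo f1 fns lines n vis = pvAgo f2 fns lines n vis := by
      intro vis hc f1 f2 h1 h2 n
      cases f1 with
      | zero => omega
      | succ g1 =>
        cases f2 with
        | zero => omega
        | succ g2 =>
          simp only [pvAgo]
          by_cases hv : n ∈ vis
          · simp [hv]
          · have hvf0 : PySem.Set.contains vis n = false := by simpa using hv
            simp only [hvf0, Bool.false_eq_true, if_false]
            cases hg : PySem.Dict.get? fns n with
            | none => simp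
            | some idx =>
              simp only []
              have hkn : n ∈ fns.keys := by
                by_contra hk
                rw [(PySem.Dict.get?_eq_none_iff_not_mem_keys fns n).mpr hk] at hg
                cases hg
              have hvf : PySem.Set.contains vis n = false := by
                simpa using hv
              have hlt := pvCnt_add_lt fns hkn hvf
              have hF' := (ih (c - 1) (by omega)).2
              exact hF' _ (by omega) g1 g2 (by omega) (by omega) fns.keys _ _
    have hF0 : ∀ (rem : List String) (vis : List String), pvCnt fns vis ≤ c →
        ∀ f1 f2, pvCnt fns vis < f1 → pvCnt fns vis < f2 →
        ∀ body acc, pvAfor f1 fns lines body rem acc vis = pvAfor f2 fns lines body rem acc vis := by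
      intro rem
      induction rem with
      | nil => intro vis hc f1 f2 h1 h2 body acc; rw [pvAfor, pvAfor]
      | cons name rest ihr =>
        intro vis hc f1 f2 h1 h2 body acc
        rw [pvAfor, pvAfor]
        by_cases hin : PySem.Str.isIn name body
        · simp only [hin, if_pos]
          have hgo := hG vis hc f1 f2 h1 h2 name
          rw [hgo]
          have hcnt2 := pvCnt_mono fns (pvAgo_prefix f2 fns lines name vis)
          exact ihr _ (le_trans hcnt2 hc) f1 f2 (lt_of_le_of_lt hcnt2 h1)
            (lt_of_le_of_lt hcnt2 h2) body _
        · simp only [hin, Bool.false_eq_true, if_neg, not_false_eq_true]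
          exact ihr vis hc f1 f2 h1 h2 body acc
    exact ⟨hG, fun vis hc f1 f2 h1 h2 rem body acc => hF0 rem vis hc f1 f2 h1 h2 body acc⟩

lemma pvAnodes_fuel (fns : PySem.Dict String Int) (lines : List String) (ns : List String) :
    ∀ vis f1 f2, pvCnt fns vis < f1 → pvCnt fns vis < f2 →
    pvAnodes f1 fns lines ns vis = pvAnodes f2 fns lines ns vis := by
  induction ns with
  | nil => intro vis f1 f2 h1 h2; rfl
  | cons n ns ih =>
    intro vis f1 f2 h1 h2
    have hgo := (pvAgo_fuel fns lines (pvCnt fns vis)).1 vis le_rfl f1 f2 h1 h2 n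
    simp only [pvAnodes, hgo]
    have hcnt2 := pvCnt_mono fns (pvAgo_prefix f2 fns lines n vis)
    rw [ih _ f1 f2 (lt_of_le_of_lt hcnt2 h1) (lt_of_le_of_lt hcnt2 h2)]

lemma pvAfor_eq_nodes (fuel : Nat) (fns : PySem.Dict String Int) (lines : List String)
    (body : String) : ∀ rem acc vis,
    pvAfor fuel fns lines body rem acc vis =
      ((acc ++ (pvAnodes fuel fns lines (rem.filter (fun n => PySem.Str.isIn n body)) vis).1),
       (pvAnodes fuel fns lines (rem.filter (fun n => PySem.Str.isIn n body)) vis).2) := by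
  intro rem
  induction rem with
  | nil => intro acc vis; simp [pvAfor, pvAnodes]
  | cons name rest ih =>
    intro acc vis
    rw [pvAfor]
    by_cases h : PySem.Str.isIn name body
    · simp only [h, if_pos, List.filter_cons_of_pos, ih, pvAnodes, List.append_assoc]
    · simp only [h, Bool.false_eq_true, if_neg, not_false_eq_true,
        List.filter_cons_of_neg, ih]

lemma pvAnodes_append (fuel : Nat) (fns : PySem.Dict String Int) (lines : List String)
    (l1 l2 : List String) : ∀ vis,
    pvAnodes fuel fns lines (l1 ++ l2) vis =
      ((pvAnodes fuel fns lines l1 vis).1 ++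
        (pvAnodes fuel fns lines l2 (pvAnodes fuel fns lines l1 vis).2).1,
       (pvAnodes fuel fns lines l2 (pvAnodes fuel fns lines l1 vis).2).2) := by
  induction l1 with
  | nil => intro vis; simp [pvAnodes]
  | cons n ns ih =>
    intro vis
    simp only [List.cons_append, pvAnodes, ih, List.append_assoc]

-- the main bridge: B's stack loop computes A's sequential recursion
lemma pvBloop_eq (fns : PySem.Dict String Int) (lines : List String) : ∀ fB stack vis out fA,
    (∀ n ∈ stack, n ∈ fns.keys ∨ n ∈ vis) → pvCnt fns vis < fA →
    stack.length + pvCnt fns vis * (fns.keys.length + 1) ≤ fB →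
    pvBloop fB fns lines stack vis out = out ++ (pvAnodes fA fns lines stack vis).1 := by
  intro fB
  induction fB with
  | zero =>
    intro stack vis out fA hstk hfa hb
    have : stack = [] := List.length_eq_zero_iff.mp (by omega)
    subst this
    simp [pvBloop, pvAnodes]
  | succ fB ih =>
    intro stack vis out fA hstk hfa hb
    cases stack with
    | nil => simp [pvBloop, pvAnodes]
    | cons node rest =>
      cases fA with
      | zero => omega
      | succ g =>
        rw [pvBloop]
        by_cases hv : node ∈ vis
        · simp only [show PySem.Set.contains vis node = true by simpa using hv, if_pos]
          have hnodes : pvAnodes (g + 1) fns lines (node :: rest) vis =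
              pvAnodes (g + 1) fns lines rest vis := by
            have : pvAgo (g + 1) fns lines node vis = ([], vis) := by
              rw [pvAgo]; simp [hv]
            simp [pvAnodes, this]
          rw [hnodes]
          exact ih rest vis out (g + 1) (fun n hn => hstk n (List.mem_cons_of_mem _ hn))
            hfa (by simp at hb ⊢; omega)
        · have hvf : PySem.Set.contains vis node = false := by simpa using hv
          have hnv : node ∉ vis := hv
          simp only [hvf, Bool.false_eq_true, if_neg, not_false_eq_true]
          have hkn : node ∈ fns.keys := by
            rcases hstk node List.mem_cons_self with h | h
            · exact h
            · exact absurd h hnv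
          obtain ⟨idx, hg⟩ : ∃ idx, PySem.Dict.get? fns node = some idx := by
            cases hgo : PySem.Dict.get? fns node with
            | none => exact absurd hkn ((PySem.Dict.get?_eq_none_iff_not_mem_keys fns node).mp hgo)
            | some v => exact ⟨v, rfl⟩
          simp only [hg]
          have hlt := pvCnt_add_lt fns hkn hvf
          set vis' := PySem.Set.add vis node with hvis'
          set body := extract_single_function lines idx with hbody
          set children := fns.keys.filter (fun name => PySem.Str.isIn name body) with hch
          -- LHS via induction hypothesis
          have hchk : ∀ n ∈ children, n ∈ fns.keys := fun n hn => List.mem_of_mem_filter hn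
          have hvis'm : ∀ x ∈ vis, x ∈ vis' := by
            intro x hx; rw [hvis']; simp [PySem.Set.add]; by_cases hc : node ∈ vis <;> simp [hc, hx]
          have hstk' : ∀ n ∈ children ++ rest, n ∈ fns.keys ∨ n ∈ vis' := by
            intro n hn
            rcases List.mem_append.mp hn with h | h
            · exact Or.inl (hchk n h)
            · rcases hstk n (List.mem_cons_of_mem _ h) with h2 | h2
              · exact Or.inl h2
              · exact Or.inr (hvis'm n h2)
          have hchlen : children.length ≤ fns.keys.length := by
            rw [hch]; exact List.length_filter_le _ _
          have hb' : (children ++ rest).length + pvCnt fns vis' * (fns.keys.length + 1) ≤ fB := by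
            simp only [List.length_append]
            simp only [List.length_cons] at hb
            have h1 : pvCnt fns vis' + 1 ≤ pvCnt fns vis := hlt
            have h2 : pvCnt fns vis' * (fns.keys.length + 1) + (fns.keys.length + 1) ≤
                pvCnt fns vis * (fns.keys.length + 1) := by
              have h3 := Nat.mul_le_mul_right (fns.keys.length + 1) h1
              rwa [Nat.succ_mul] at h3
            omega
          rw [ih (children ++ rest) vis' (out ++ [body]) (g + 1) hstk' (by omega) hb']
          -- RHS: unfold one step of pvAnodes
          have hgo1 : pvAgo (g + 1) fns lines node vis =
              (body :: (pvAnodes (g + 1) fns lines children vis').1,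
               (pvAnodes (g + 1) fns lines children vis').2) := by
            rw [pvAgo]
            simp only [hvf, Bool.false_eq_true, if_false, hg]
            rw [pvAfor_eq_nodes]
            have hfe : pvAnodes g fns lines children vis' = pvAnodes (g + 1) fns lines children vis' := by
              apply pvAnodes_fuel <;> omega
            rw [← hch, ← hvis', ← hbody, hfe]
            simp
          have := pvAnodes_append (g + 1) fns lines children rest vis'
          simp only [pvAnodes, hgo1, this, List.append_assoc]
          simp

-- membership in the keys of the dict built from the input association list
lemma pvMem_keys_ofList (l : List (String × Int)) (k : String) :
    k ∈ (PySem.Dict.ofList l).keys ↔ k ∈ l.map Prod.fst := by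
  have h1 : (PySem.Dict.ofList l).keys =
      PySem.Set.update (PySem.Dict.empty : PySem.Dict String Int).keys (l.map Prod.fst) :=
    PySem.Dict.keys_foldl_insert_key l Prod.fst (fun d x => x.2) PySem.Dict.empty
  rw [h1]
  simp [pysem]

lemma pvTop_eq (fns : PySem.Dict String Int) (lines : List String) (function : String)
    (vis0 : List String) (hf : function ∈ fns.keys ∨ function ∈ vis0) :
    (pvAgo (fns.keys.length + 1) fns lines function vis0).1 =
      pvBloop (fns.keys.length * (fns.keys.length + 1) + 1) fns lines [function] vis0 [] := by
  have hcnt : pvCnt fns vis0 ≤ fns.keys.length := List.countP_le_length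
  have hmul := Nat.mul_le_mul_right (fns.keys.length + 1) hcnt
  have hB := pvBloop_eq fns lines (fns.keys.length * (fns.keys.length + 1) + 1)
    [function] vis0 [] (fns.keys.length + 1)
    (by intro n hn; rw [List.mem_singleton] at hn; subst hn; exact hf)
    (by omega) (by simp only [List.length_singleton]; omega)
  rw [hB]
  simp [pvAnodes]

-- ===== VERDICT (by name: the statement is the Claim_ definition above) =====
theorem extract_called_functions_spec : Claim_equal_extract_called_functions := by
  intro function_names function lines visited _ hpre
  unfold Spec_extract_called_functions
  unfold extract_called_functions extract_called_functions_alt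
  cases visited with
  | none =>
    apply pvTop_eq
    rcases hpre with h | h
    · exact Or.inl ((pvMem_keys_ofList function_names function).mpr h)
    · simp at h
  | some v =>
    apply pvTop_eq
    rcases hpre with h | h
    · exact Or.inl ((pvMem_keys_ofList function_names function).mpr h)
    · exact Or.inr h
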